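-- pv_equiv track=rewrite | github.com/anthonytk31415/leetcode | python-fundamentals/largestSubmatrix.py | largestSubmatrix1
-- ===== SOURCE A (Python) =====
-- def largestSubmatrix1(matrix):
--
--     heights = [[x for x in row] for row in matrix]
--     for i in range(len(matrix)):
--
--         for j in range(len(matrix[0])):
--             if matrix[i][j] == 1:
--                 if i == 0:
--                     heights[i][j] = 1
--                 else:
--                     heights[i][j] = 1 + heights[i-1][j]
--             else:
--                 heights[i][j] = 0
--
--     maxRect = 0
--     for i in range(len(heights)):
--         heights[i].sort()
--         for j in range(len(heights[0])):
--             height = heights[i][j]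
--             width = len(heights[0]) - j
--             maxRect = max(maxRect, height * width)
--
--     return maxRect
-- ===== SOURCE B (Python) =====
-- def largestSubmatrix1(matrix):
--     n = len(matrix[0]) if matrix else 0
--     prev = [0] * n
--     best = 0
--     for row in matrix:
--         heights = list(row)
--         for j in range(n):
--             heights[j] = prev[j] + 1 if row[j] == 1 else 0
--         for v in heights:
--             width = n - sum(1 for x in heights if x < v)
--             if width > 0:
--                 best = max(best, v * width)
--         prev = heights
--     return best
-- ===== Notes on version B (the rewrite author's own statement) =====
-- stated objective: alternative
-- what changed: Phase two no longer sorts each height row and scans sorted positions: for each value in the row's height buffer B counts how many entries are smaller and takes the candidate area v*(n - smaller) when that width is positive, so the per-row sort and the positional width scan disappear; phase one keeps only the previous height row instead of a full copied heights matrix.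
import Mathlib
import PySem

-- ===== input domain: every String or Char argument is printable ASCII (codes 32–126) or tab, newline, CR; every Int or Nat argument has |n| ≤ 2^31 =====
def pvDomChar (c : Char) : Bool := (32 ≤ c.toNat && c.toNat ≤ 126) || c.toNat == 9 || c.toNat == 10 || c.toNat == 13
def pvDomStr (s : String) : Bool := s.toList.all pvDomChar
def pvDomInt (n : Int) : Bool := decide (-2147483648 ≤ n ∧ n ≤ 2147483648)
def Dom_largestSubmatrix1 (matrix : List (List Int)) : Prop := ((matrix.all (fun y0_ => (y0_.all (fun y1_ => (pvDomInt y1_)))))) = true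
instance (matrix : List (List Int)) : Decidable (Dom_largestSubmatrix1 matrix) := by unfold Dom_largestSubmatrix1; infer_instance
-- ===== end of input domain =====

-- B keeps the column-height DP but drops A's per-row sort + positional width scan: each
-- candidate area is v * (n - #smaller entries) for v in the row's height buffer, and only
-- the previous height row is kept instead of a whole heights matrix (objective: alternative).

-- ===== PORT A =====
-- Phase 1 of A: heights[i][j] = 1 + heights[i-1][j] (1 in row 0) if matrix[i][j]==1 else 0,
-- written into a copy of the row; entries beyond len(matrix[0]) keep the copied originals
-- (row.drop n).  List.getD is exact for the in-range accesses Pre_ admits.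
def lsmHeightsA (rows : List (List Int)) (n : Nat) (prev : Option (List Int)) : List (List Int) :=
  match rows with
  | [] => []
  | row :: rest =>
      let h := ((List.range n).map (fun j =>
        if row.getD j 0 = 1 then
          match prev with
          | none => 1
          | some p => 1 + p.getD j 0
        else 0)) ++ row.drop n
      h :: lsmHeightsA rest n (some h)

def largestSubmatrix1 (matrix : List (List Int)) : Int :=
  let n := (matrix.headD []).length
  let heights := lsmHeightsA matrix n none
  heights.foldl (fun acc hrow =>
    let s := PySem.List.sorted hrow (fun x => x) false
    (List.range n).foldl (fun a j => max a (s.getD j 0 * ((n : Int) - (j : Int)))) acc) 0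

-- ===== PORT B =====
-- Source B: sum(1 for x in heights if x < v)
def countLt (l : List Int) (v : Int) : Nat := (l.filter (fun x => x < v)).length

def largestSubmatrix1_alt (matrix : List (List Int)) : Int :=
  let n := (matrix.headD []).length
  (matrix.foldl (fun (st : List Int × Int) row =>
      -- Source B: heights = list(row); for j in range(n): heights[j] = prev[j] + 1 if row[j] == 1 else 0
      let heights := (List.range n).foldl
        (fun (h : List Int) j => h.set j (if row.getD j 0 = 1 then st.1.getD j 0 + 1 else 0)) row
      -- Source B: for v in heights: width = n - …; if width > 0: best = max(best, v * width)
      let best := heights.foldl (fun best v =>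
        let width := (n : Int) - (countLt heights v : Int)
        if 0 < width then max best (v * width) else best) st.2
      (heights, best)) (List.replicate (matrix.headD []).length 0, 0)).2

-- ===== PRECONDITION & SPEC =====
-- Pre_ admits exactly the inputs on which the Python A returns: on a row shorter than
-- row 0, A raises IndexError while writing heights[i][j].
def Pre_largestSubmatrix1 (matrix : List (List Int)) : Prop :=
  ∀ row ∈ matrix, (matrix.headD []).length ≤ row.length
instance (matrix : List (List Int)) : Decidable (Pre_largestSubmatrix1 matrix) := by
  unfold Pre_largestSubmatrix1; infer_instance

def pvWitness_largestSubmatrix1 : List (List Int) := [[1, 0], [1, 1]]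

def Spec_largestSubmatrix1 (matrix : List (List Int)) (out : Int) : Prop := out = largestSubmatrix1_alt matrix
instance (matrix : List (List Int)) (out : Int) : Decidable (Spec_largestSubmatrix1 matrix out) := by unfold Spec_largestSubmatrix1; infer_instance

-- ===== CLAIM (what is proved, stated in full; the proofs are below) =====
def Claim_equal_largestSubmatrix1 : Prop := ∀ (matrix : List (List Int)), Dom_largestSubmatrix1 matrix → Pre_largestSubmatrix1 matrix → Spec_largestSubmatrix1 matrix (largestSubmatrix1 matrix)

-- ===== LEMMAS AND PROOFS =====

-- value of A's sorted positional scan: max over j < n of s[j]*(n-j) (0 if n = 0)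
def aMaxN : List Int → Nat → Int
  | _, 0 => 0
  | [], _+1 => 0
  | x :: t, k+1 => max (x * ((k : Int) + 1)) (aMaxN t k)

-- value of B's rank-counting pass over ys (ranks taken in the reference list l)
def cAux (l : List Int) (n : Nat) : List Int → Int
  | [] => 0
  | v :: ys =>
    if countLt l v < n then max (v * ((n : Int) - (countLt l v : Int))) (cAux l n ys)
    else cAux l n ys

theorem cAux_nonneg (l : List Int) (n : Nat) (ys : List Int) : 0 ≤ cAux l n ys := by
  induction ys with
  | nil => simp [cAux]
  | cons v ys ih =>
    rw [cAux]
    split_ifs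
    · exact le_trans ih (le_max_right _ _)
    · exact ih

theorem le_cAux (l : List Int) (n : Nat) (ys : List Int) (v : Int) (hv : v ∈ ys)
    (hr : countLt l v < n) : v * ((n : Int) - (countLt l v : Int)) ≤ cAux l n ys := by
  induction ys with
  | nil => cases hv
  | cons w ys ih =>
    rw [cAux]
    rcases List.mem_cons.mp hv with rfl | hv'
    · rw [if_pos hr]; exact le_max_left _ _
    · split_ifs
      · exact le_trans (ih hv') (le_max_right _ _)
      · exact ih hv'

theorem cAux_le (l : List Int) (n : Nat) (ys : List Int) (X : Int) (hX : 0 ≤ X)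
    (hc : ∀ v ∈ ys, countLt l v < n → v * ((n : Int) - (countLt l v : Int)) ≤ X) :
    cAux l n ys ≤ X := by
  induction ys with
  | nil => simpa [cAux] using hX
  | cons w ys ih =>
    rw [cAux]
    split_ifs with hw
    · exact max_le (hc w (by simp) hw) (ih (fun v hv h => hc v (List.mem_cons_of_mem _ hv) h))
    · exact ih (fun v hv h => hc v (List.mem_cons_of_mem _ hv) h)

theorem countLt_cons (x : Int) (l : List Int) (v : Int) :
    countLt (x :: l) v = (if x < v then 1 else 0) + countLt l v := by
  unfold countLt
  rw [List.filter_cons]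
  by_cases h : x < v
  · rw [if_pos (by simpa using h), if_pos h, List.length_cons]
    omega
  · rw [if_neg (by simpa using h), if_neg h]
    omega

theorem countLt_zero_of_min (l : List Int) (v : Int) (hb : ∀ y ∈ l, v ≤ y) :
    countLt l v = 0 := by
  unfold countLt
  rw [List.filter_eq_nil_iff.mpr]
  · rfl
  · intro y hy
    have := hb y hy
    simp only [decide_eq_true_eq]
    omega

theorem countLt_perm (l l' : List Int) (hp : l.Perm l') (v : Int) :
    countLt l v = countLt l' v := by
  simp [countLt, (hp.filter _).length_eq]

theorem cAux_congr_ref (l l' : List Int) (n : Nat) (hc : ∀ v, countLt l v = countLt l' v)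
    (ys : List Int) : cAux l n ys = cAux l' n ys := by
  induction ys with
  | nil => rfl
  | cons v ys ih => rw [cAux, cAux, hc v, ih]

theorem cAux_perm_fold (l : List Int) (n : Nat) (ys ys' : List Int) (hp : ys.Perm ys') :
    cAux l n ys = cAux l n ys' := by
  apply le_antisymm
  · exact cAux_le l n ys _ (cAux_nonneg _ _ _)
      (fun v hv h => le_cAux l n ys' v (hp.mem_iff.mp hv) h)
  · exact cAux_le l n ys' _ (cAux_nonneg _ _ _)
      (fun v hv h => le_cAux l n ys v (hp.mem_iff.mpr hv) h)

-- A's scan over the sorted list, as a recursion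
theorem foldA2 (s : List Int) : ∀ (n : Nat) (acc : Int), 0 ≤ acc → n ≤ s.length →
    (List.range n).foldl (fun a j => max a (s.getD j 0 * ((n : Int) - (j : Int)))) acc
      = max acc (aMaxN s n) := by
  induction s with
  | nil =>
    intro n acc hacc hn
    have hn0 : n = 0 := by simpa using hn
    subst hn0
    simp [aMaxN]
    omega
  | cons x rest ih =>
    intro n acc hacc hn
    match n with
    | 0 =>
      simp [aMaxN]
      omega
    | k+1 =>
      rw [List.range_succ_eq_map, List.foldl_cons, List.foldl_map]
      have hfun : (fun (a : Int) (j : Nat) =>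
          max a ((x :: rest).getD (j+1) 0 * (((k+1 : Nat) : Int) - ((j+1 : Nat) : Int))))
          = fun a j => max a (rest.getD j 0 * ((k : Int) - (j : Int))) := by
        funext a j
        simp only [List.getD_cons_succ]
        congr 1
        push_cast
        ring
      rw [hfun]
      have h0 : max acc ((x :: rest).getD 0 0 * (((k+1 : Nat) : Int) - ((0 : Nat) : Int)))
          = max acc (x * ((k : Int) + 1)) := by
        simp only [List.getD_cons_zero]
        norm_num
      rw [h0, ih k _ (le_trans hacc (le_max_left _ _)) (by simpa using hn), aMaxN, max_assoc]

-- each rank-counting candidate is dominated by A's scan value (on a sorted list)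
theorem ge_dir (s : List Int) : ∀ (n : Nat) (v : Int), s.Pairwise (· ≤ ·) → v ∈ s →
    countLt s v < n → v * ((n : Int) - (countLt s v : Nat)) ≤ max 0 (aMaxN s n) := by
  induction s with
  | nil => intro n v _ hv; cases hv
  | cons x t ih =>
    intro n v hs hv hr
    match n with
    | 0 => omega
    | k+1 =>
      have hxt : ∀ y ∈ t, x ≤ y := (List.pairwise_cons.mp hs).1
      by_cases hvx : v ≤ x
      · have h0 : countLt (x :: t) v = 0 := by
          apply countLt_zero_of_min
          intro y hy
          rcases List.mem_cons.mp hy with rfl | hy'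
          · exact hvx
          · exact le_trans hvx (hxt y hy')
        rw [h0]
        have : v * (((k+1 : Nat) : Int) - ((0 : Nat) : Int)) ≤ x * ((k : Int) + 1) := by
          push_cast
          have : (0 : Int) ≤ (k : Int) + 1 := by positivity
          nlinarith
        calc v * (((k+1 : Nat) : Int) - ((0 : Nat) : Int)) ≤ x * ((k : Int) + 1) := this
          _ ≤ aMaxN (x :: t) (k+1) := le_max_left _ _
          _ ≤ max 0 (aMaxN (x :: t) (k+1)) := le_max_right _ _
      · have hvt : v ∈ t := by
          rcases List.mem_cons.mp hv with rfl | h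
          · omega
          · exact h
        have hcnt : countLt (x :: t) v = 1 + countLt t v := by
          rw [countLt_cons, if_pos (by omega)]
        have hrt : countLt t v < k := by omega
        have := ih k v (List.pairwise_cons.mp hs).2 hvt hrt
        have heq : v * (((k+1 : Nat) : Int) - (countLt (x :: t) v : Nat))
            = v * ((k : Int) - (countLt t v : Nat)) := by
          rw [hcnt]
          push_cast
          ring
        rw [heq]
        refine le_trans this ?_
        have : aMaxN t k ≤ aMaxN (x :: t) (k+1) := le_max_right _ _
        exact max_le_max (le_refl 0) this

-- A's scan value is dominated by the rank-counting value (on a sorted list)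
theorem le_dir (s : List Int) : ∀ (n : Nat), s.Pairwise (· ≤ ·) → n ≤ s.length →
    aMaxN s n ≤ max 0 (cAux s n s) := by
  induction s with
  | nil =>
    intro n _ hn
    have hn0 : n = 0 := by simpa using hn
    subst hn0
    simp [aMaxN]
  | cons x t ih =>
    intro n hs hn
    match n with
    | 0 => simp [aMaxN]
    | k+1 =>
      have hxt : ∀ y ∈ t, x ≤ y := (List.pairwise_cons.mp hs).1
      rw [aMaxN]
      apply max_le
      · by_cases hx0 : 0 ≤ x
        · have h0 : countLt (x :: t) x = 0 := by
            apply countLt_zero_of_min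
            intro y hy
            rcases List.mem_cons.mp hy with rfl | hy'
            · exact le_refl _
            · exact hxt y hy'
          have := le_cAux (x :: t) (k+1) (x :: t) x (by simp) (by omega)
          rw [h0] at this
          have heq : x * (((k+1 : Nat) : Int) - ((0 : Nat) : Int)) = x * ((k : Int) + 1) := by
            push_cast; ring
          rw [heq] at this
          exact le_trans this (le_max_right _ _)
        · have : x * ((k : Int) + 1) ≤ 0 := by
            have : (0 : Int) ≤ (k : Int) + 1 := by positivity
            nlinarith
          exact le_trans this (le_max_left _ _)
      · refine le_trans (ih k (List.pairwise_cons.mp hs).2 (by simpa using hn)) ?_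
        apply max_le (le_max_left _ _)
        apply cAux_le
        · exact le_max_left _ _
        · intro v hv hr
          by_cases hv0 : 0 ≤ v
          · have hle : countLt (x :: t) v ≤ countLt t v + 1 := by
              rw [countLt_cons]
              split_ifs <;> omega
            have hrs : countLt (x :: t) v < k + 1 := by omega
            have hcand := le_cAux (x :: t) (k+1) (x :: t) v (List.mem_cons_of_mem _ hv) hrs
            refine le_trans ?_ (le_trans hcand (le_max_right _ _))
            have h1 : ((k : Int) - (countLt t v : Nat)) ≤ (((k+1 : Nat) : Int) - (countLt (x :: t) v : Nat)) := by
              omega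
            exact mul_le_mul_of_nonneg_left h1 hv0
          · have : v * ((k : Int) - (countLt t v : Nat)) ≤ 0 := by
              have h2 : (0 : Int) ≤ (k : Int) - (countLt t v : Nat) := by omega
              nlinarith
            exact le_trans this (le_max_left _ _)

theorem core2 (s : List Int) (n : Nat) (hs : s.Pairwise (· ≤ ·)) (hn : n ≤ s.length) :
    max 0 (aMaxN s n) = max 0 (cAux s n s) := by
  apply le_antisymm
  · exact max_le (le_max_left _ _) (le_dir s n hs hn)
  · apply max_le (le_max_left _ _)
    apply cAux_le
    · exact le_max_left _ _
    · exact fun v hv hr => ge_dir s n v hs hv hr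

theorem max_b_max0 (b X : Int) (hb : 0 ≤ b) : max b X = max b (max 0 X) := by
  rcases le_total X 0 with h | h
  · rw [max_eq_left (le_trans h hb), max_eq_left h, max_eq_left hb]
  · rw [max_eq_right h]

theorem getD_replicate_zero (n j : Nat) : (List.replicate n (0 : Int)).getD j 0 = 0 := by
  by_cases hj : j < n
  · rw [List.getD_eq_getElem _ _ (by simpa using hj), List.getElem_replicate]
  · exact List.getD_eq_default _ _ (by simpa using hj)

-- A's first row (prev = none) is the row computed from an all-zero previous row
theorem replRow (n : Nat) (rows : List (List Int)) :
    lsmHeightsA rows n none = lsmHeightsA rows n (some (List.replicate n 0)) := by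
  cases rows with
  | nil => rfl
  | cons row rest =>
    simp only [lsmHeightsA]
    have h : (fun (j : Nat) =>
        if row.getD j 0 = 1 then (1 : Int) else 0)
        = fun j => if row.getD j 0 = 1 then 1 + (List.replicate n (0 : Int)).getD j 0 else 0 := by
      funext j
      rw [getD_replicate_zero]
      split_ifs <;> omega
    rw [h]

-- setting at the boundary of an append
theorem set_append_boundary (A : List Int) : ∀ (x : Int) (B : List Int) (v : Int),
    (A ++ x :: B).set A.length v = A ++ v :: B := by
  induction A with
  | nil => intro x B v; rfl
  | cons a as ih => intro x B v; simp [List.set_cons_succ, ih]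

-- B's in-place phase-1 loop produces A's height row (first n entries overwritten, tail kept)
theorem phase1_eq (row p : List Int) : ∀ (k : Nat), k ≤ row.length →
    (List.range k).foldl
        (fun (h : List Int) j => h.set j (if row.getD j 0 = 1 then p.getD j 0 + 1 else 0)) row
      = (List.range k).map (fun j => if row.getD j 0 = 1 then 1 + p.getD j 0 else 0)
          ++ row.drop k := by
  intro k
  induction k with
  | zero => intro _; simp
  | succ k ih =>
    intro hk
    rw [List.range_succ, List.foldl_append, List.foldl_cons, List.foldl_nil, ih (by omega)]
    have hlen : ((List.range k).map
        (fun j => if row.getD j 0 = 1 then 1 + p.getD j 0 else 0)).length = k := by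
      simp
    have hdk : row.drop k = row[k] :: row.drop (k+1) :=
      List.drop_eq_getElem_cons (by omega)
    rw [hdk]
    have hset := set_append_boundary
      ((List.range k).map (fun j => if row.getD j 0 = 1 then 1 + p.getD j 0 else 0))
      row[k] (row.drop (k+1)) (if row.getD k 0 = 1 then p.getD k 0 + 1 else 0)
    rw [hlen] at hset
    rw [hset, List.map_append]
    simp only [List.map_cons, List.map_nil]
    rw [List.append_assoc]
    congr 2
    split_ifs <;> ring

-- B's rank-counting inner loop accumulates the max of b and all positive-width candidates
theorem foldB (l : List Int) (n : Nat) : ∀ (ys : List Int) (b : Int), 0 ≤ b →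
    ys.foldl (fun best v =>
        let width := (n : Int) - (countLt l v : Int)
        if 0 < width then max best (v * width) else best) b
      = max b (cAux l n ys) := by
  intro ys
  induction ys with
  | nil => intro b hb; simp [cAux]; omega
  | cons v ys ih =>
    intro b hb
    rw [List.foldl_cons]
    rw [show (let width := (n : Int) - (countLt l v : Int)
          if 0 < width then max b (v * width) else b)
        = if 0 < (n : Int) - (countLt l v : Int)
          then max b (v * ((n : Int) - (countLt l v : Int))) else b from rfl, cAux]
    by_cases hc : countLt l v < n
    · rw [if_pos (by omega), if_pos hc, ih _ (le_trans hb (le_max_left _ _)), max_assoc]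
    · rw [if_neg (by omega), if_neg hc]
      exact ih b hb

-- loop invariant: B's fold over the remaining rows equals A's fold over its height rows
theorem main_loop (n : Nat) : ∀ (rows : List (List Int)) (p : List Int) (b : Int),
    0 ≤ b → (∀ r ∈ rows, n ≤ r.length) →
    (rows.foldl (fun (st : List Int × Int) row =>
        let heights := (List.range n).foldl
          (fun (h : List Int) j => h.set j (if row.getD j 0 = 1 then st.1.getD j 0 + 1 else 0)) row
        let best := heights.foldl (fun best v =>
          let width := (n : Int) - (countLt heights v : Int)
          if 0 < width then max best (v * width) else best) st.2
        (heights, best)) (p, b)).2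
      = (lsmHeightsA rows n (some p)).foldl
          (fun acc hrow =>
            let s := PySem.List.sorted hrow (fun x => x) false
            (List.range n).foldl (fun a j => max a (s.getD j 0 * ((n : Int) - (j : Int)))) acc) b := by
  intro rows
  induction rows with
  | nil => intro p b _ _; simp [lsmHeightsA]
  | cons row rest ih =>
    intro p b hb hlens
    have hrn : n ≤ row.length := hlens row (by simp)
    have hA : lsmHeightsA (row :: rest) n (some p)
        = ((List.range n).map (fun j => if row.getD j 0 = 1 then 1 + p.getD j 0 else 0)
            ++ row.drop n)
          :: lsmHeightsA rest n
              (some ((List.range n).map (fun j => if row.getD j 0 = 1 then 1 + p.getD j 0 else 0)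
                ++ row.drop n)) := by
      simp only [lsmHeightsA]
    rw [hA, List.foldl_cons, List.foldl_cons]
    set hrow := (List.range n).map (fun j => if row.getD j 0 = 1 then 1 + p.getD j 0 else 0)
      ++ row.drop n with hhrow
    have hph : (List.range n).foldl
        (fun (h : List Int) j => h.set j (if row.getD j 0 = 1 then p.getD j 0 + 1 else 0)) row
        = hrow := phase1_eq row p n hrn
    have hrlen : n ≤ hrow.length := by
      rw [hhrow]
      simp
    set s := PySem.List.sorted hrow (fun x => x) false with hs
    have hperm : s.Perm hrow := PySem.List.sorted_perm _ _ _
    have hpw : s.Pairwise (· ≤ ·) := by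
      simpa using PySem.List.sorted_pairwise (xs := hrow) (key := fun x => x)
    have hslen : n ≤ s.length := by
      rw [hs, PySem.List.length_sorted]
      exact hrlen
    have hArow : (List.range n).foldl
          (fun a j => max a (s.getD j 0 * ((n : Int) - (j : Int)))) b
        = max b (cAux hrow n hrow) := by
      rw [foldA2 s n b hb hslen, max_b_max0 b (aMaxN s n) hb, core2 s n hpw hslen,
        cAux_congr_ref s hrow n (fun v => countLt_perm s hrow hperm v) s,
        cAux_perm_fold hrow n s hrow hperm, ← max_b_max0 b (cAux hrow n hrow) hb]
    show (List.foldl (fun (st : List Int × Int) row =>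
        let heights := (List.range n).foldl
          (fun (h : List Int) j => h.set j (if row.getD j 0 = 1 then st.1.getD j 0 + 1 else 0)) row
        let best := heights.foldl (fun best v =>
          let width := (n : Int) - (countLt heights v : Int)
          if 0 < width then max best (v * width) else best) st.2
        (heights, best))
      (((List.range n).foldl
          (fun (h : List Int) j => h.set j (if row.getD j 0 = 1 then p.getD j 0 + 1 else 0)) row),
        (((List.range n).foldl
          (fun (h : List Int) j => h.set j (if row.getD j 0 = 1 then p.getD j 0 + 1 else 0)) row).foldl
          (fun best v =>
            let width := (n : Int) - (countLt ((List.range n).foldl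
              (fun (h : List Int) j => h.set j (if row.getD j 0 = 1 then p.getD j 0 + 1 else 0)) row) v : Int)
            if 0 < width then max best (v * width) else best) b)) rest).2
      = List.foldl (fun acc hrow =>
          let s := PySem.List.sorted hrow (fun x => x) false
          (List.range n).foldl (fun a j => max a (s.getD j 0 * ((n : Int) - (j : Int)))) acc)
        ((List.range n).foldl (fun a j => max a (s.getD j 0 * ((n : Int) - (j : Int)))) b)
        (lsmHeightsA rest n (some hrow))
    rw [hph, foldB hrow n hrow b hb, hArow]
    exact ih hrow (max b (cAux hrow n hrow)) (le_trans hb (le_max_left _ _))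
      (fun r hrr => hlens r (List.mem_cons_of_mem _ hrr))

-- ===== VERDICT (by name: the statement is the Claim_ definition above) =====
theorem largestSubmatrix1_spec : Claim_equal_largestSubmatrix1 := by
  unfold Claim_equal_largestSubmatrix1
  intro matrix _hd hpre
  unfold Spec_largestSubmatrix1
  cases matrix with
  | nil => rfl
  | cons r0 rest =>
    unfold Pre_largestSubmatrix1 at hpre
    simp only [List.headD_cons] at hpre
    show largestSubmatrix1 (r0 :: rest) = largestSubmatrix1_alt (r0 :: rest)
    unfold largestSubmatrix1 largestSubmatrix1_alt
    simp only [List.headD_cons]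
    rw [replRow]
    rw [← main_loop r0.length (r0 :: rest) (List.replicate r0.length 0) 0 (le_refl 0) hpre]
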